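-- pv_equiv track=rewrite | github.com/ookok/LivingTreeAlAgent | localresources/LivingTreeAlAgent/core/smart_help_system/question_sanitizer.py | _assess_privacy_level
-- ===== SOURCE A (Python) =====
-- from typing import List, Dict, Any, Optional
--
-- def _assess_privacy_level(detected_types: List[str]) -> str:
--     """评估隐私等级"""
--     if not detected_types:
--         return "low"
--
--     # 高敏感类别
--     high_risk = {"api_key", "password", "db_connection", "id_card"}
--     medium_risk = {"phone", "email", "name", "internal_project"}
--
--     if any(t in high_risk for t in detected_types):
--         return "high"
--     elif any(t in medium_risk for t in detected_types):
--         return "medium"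
--     return "low"
-- ===== SOURCE B (Python) =====
-- _RANK = {"api_key": 2, "password": 2, "db_connection": 2, "id_card": 2,
--          "phone": 1, "email": 1, "name": 1, "internal_project": 1}
-- _LABELS = ("low", "medium", "high")
--
-- def _assess_privacy_level(detected_types):
--     """Single pass: take the maximum severity rank, then map rank -> label."""
--     r = 0
--     for t in detected_types:
--         r = max(r, _RANK.get(t, 0))
--     return _LABELS[r]
-- ===== Notes on version B (the rewrite author's own statement) =====
-- stated objective: alternative
-- what changed: Replaces two sequential any()-membership scans over frozen sets (plus an empty-list special case) by one fold computing the maximum severity rank from a type->rank table, followed by a rank->label lookup.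
import Mathlib
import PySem

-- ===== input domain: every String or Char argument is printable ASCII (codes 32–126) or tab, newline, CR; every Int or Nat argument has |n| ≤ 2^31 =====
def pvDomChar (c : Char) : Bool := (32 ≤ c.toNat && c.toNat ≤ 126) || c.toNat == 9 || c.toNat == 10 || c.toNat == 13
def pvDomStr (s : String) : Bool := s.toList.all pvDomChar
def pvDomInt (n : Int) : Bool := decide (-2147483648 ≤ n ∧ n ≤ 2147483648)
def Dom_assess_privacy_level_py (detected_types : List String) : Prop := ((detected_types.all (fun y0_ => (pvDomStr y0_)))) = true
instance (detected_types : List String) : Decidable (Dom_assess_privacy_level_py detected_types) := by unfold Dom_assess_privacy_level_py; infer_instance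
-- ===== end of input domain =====

-- B replaces A's two sequential any()-membership scans by one fold computing the maximum severity rank plus a rank->label lookup (alternative decomposition, same cost).


-- ===== PORT A =====
def pvHigh : List String := ["api_key", "password", "db_connection", "id_card"]
def pvMed : List String := ["phone", "email", "name", "internal_project"]

def assess_privacy_level_py (detected_types : List String) : String :=
  if detected_types = [] then "low"
  else
    let high_risk : PySem.Set String := PySem.Set.ofList pvHigh
    let medium_risk : PySem.Set String := PySem.Set.ofList pvMed
    if detected_types.any (fun t => PySem.Set.contains high_risk t) then "high"
    else if detected_types.any (fun t => PySem.Set.contains medium_risk t) then "medium"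
    else "low"

-- ===== PORT B =====
def pvRank : PySem.Dict String Int :=
  PySem.Dict.mk [("api_key", 2), ("password", 2), ("db_connection", 2), ("id_card", 2),
                 ("phone", 1), ("email", 1), ("name", 1), ("internal_project", 1)]

def pvLabels : List String := ["low", "medium", "high"]

def assess_privacy_level_py_alt (detected_types : List String) : String :=
  let r := detected_types.foldl (fun acc t => max acc (PySem.Dict.getD pvRank t 0)) 0
  -- r is always 0, 1 or 2, so the tuple indexing never fails; the getD default is unreachable
  (PySem.List.pyGet? pvLabels r).getD "low"

-- ===== PRECONDITION & SPEC =====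
def Spec_assess_privacy_level_py (detected_types : List String) (out : String) : Prop := out = assess_privacy_level_py_alt detected_types
instance (detected_types : List String) (out : String) : Decidable (Spec_assess_privacy_level_py detected_types out) := by unfold Spec_assess_privacy_level_py; infer_instance

-- ===== CLAIM (what is proved, stated in full; the proofs are below) =====
def Claim_equal_assess_privacy_level_py : Prop := ∀ (detected_types : List String), Dom_assess_privacy_level_py detected_types → Spec_assess_privacy_level_py detected_types (assess_privacy_level_py detected_types)

-- ===== LEMMAS AND PROOFS =====

lemma pvRank_cases (t : String) :
    (PySem.Set.contains (PySem.Set.ofList pvHigh) t = true ∧ PySem.Dict.getD pvRank t 0 = 2) ∨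
    (PySem.Set.contains (PySem.Set.ofList pvHigh) t = false ∧
     PySem.Set.contains (PySem.Set.ofList pvMed) t = true ∧ PySem.Dict.getD pvRank t 0 = 1) ∨
    (PySem.Set.contains (PySem.Set.ofList pvHigh) t = false ∧
     PySem.Set.contains (PySem.Set.ofList pvMed) t = false ∧ PySem.Dict.getD pvRank t 0 = 0) := by
  have hs1 : PySem.Set.ofList pvHigh = pvHigh := by decide
  have hs2 : PySem.Set.ofList pvMed = pvMed := by decide
  by_cases h1 : t = "api_key"
  · subst h1; decide
  by_cases h2 : t = "password"
  · subst h2; decide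
  by_cases h3 : t = "db_connection"
  · subst h3; decide
  by_cases h4 : t = "id_card"
  · subst h4; decide
  by_cases h5 : t = "phone"
  · subst h5; decide
  by_cases h6 : t = "email"
  · subst h6; decide
  by_cases h7 : t = "name"
  · subst h7; decide
  by_cases h8 : t = "internal_project"
  · subst h8; decide
  right; right
  rw [hs1, hs2]
  refine ⟨?_, ?_, ?_⟩
  · simp [PySem.Set.contains, pvHigh, h1, h2, h3, h4]
  · simp [PySem.Set.contains, pvMed, h5, h6, h7, h8]
  · have b1 : ("api_key" == t) = false := beq_eq_false_iff_ne.mpr (Ne.symm h1)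
    have b2 : ("password" == t) = false := beq_eq_false_iff_ne.mpr (Ne.symm h2)
    have b3 : ("db_connection" == t) = false := beq_eq_false_iff_ne.mpr (Ne.symm h3)
    have b4 : ("id_card" == t) = false := beq_eq_false_iff_ne.mpr (Ne.symm h4)
    have b5 : ("phone" == t) = false := beq_eq_false_iff_ne.mpr (Ne.symm h5)
    have b6 : ("email" == t) = false := beq_eq_false_iff_ne.mpr (Ne.symm h6)
    have b7 : ("name" == t) = false := beq_eq_false_iff_ne.mpr (Ne.symm h7)
    have b8 : ("internal_project" == t) = false := beq_eq_false_iff_ne.mpr (Ne.symm h8)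
    simp [pvRank, PySem.Dict.getD, PySem.Dict.get?, List.find?, b1, b2, b3, b4, b5, b6, b7, b8]

lemma pvFold_nonneg (l : List String) (acc : Int) (h : 0 ≤ acc) :
    0 ≤ l.foldl (fun acc t => max acc (PySem.Dict.getD pvRank t 0)) acc := by
  induction l generalizing acc with
  | nil => simpa using h
  | cons t r ih =>
    simp only [List.foldl_cons]
    exact ih _ (le_trans h (le_max_left _ _))

lemma pvFold_acc (l : List String) (acc : Int) (h : 0 ≤ acc) :
    l.foldl (fun acc t => max acc (PySem.Dict.getD pvRank t 0)) acc =
      max acc (l.foldl (fun acc t => max acc (PySem.Dict.getD pvRank t 0)) 0) := by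
  induction l generalizing acc with
  | nil => simp [max_eq_left h]
  | cons t r ih =>
    simp only [List.foldl_cons]
    rw [ih (max acc (PySem.Dict.getD pvRank t 0)) (le_trans h (le_max_left _ _)),
        ih (max 0 (PySem.Dict.getD pvRank t 0)) (le_max_left _ _)]
    have hF := pvFold_nonneg r 0 le_rfl
    simp only [max_def]
    split_ifs <;> omega

lemma pvFold_char (l : List String) :
    l.foldl (fun acc t => max acc (PySem.Dict.getD pvRank t 0)) 0 =
      if l.any (fun t => PySem.Set.contains (PySem.Set.ofList pvHigh) t) then 2
      else if l.any (fun t => PySem.Set.contains (PySem.Set.ofList pvMed) t) then 1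
      else 0 := by
  induction l with
  | nil => simp
  | cons t r ih =>
    simp only [List.foldl_cons, List.any_cons]
    rw [pvFold_acc r (max 0 (PySem.Dict.getD pvRank t 0)) (le_max_left _ _), ih]
    rcases pvRank_cases t with ⟨hh, hr⟩ | ⟨hh, hm, hr⟩ | ⟨hh, hm, hr⟩
    · simp only [hh, hr, Bool.true_or]
      split_ifs <;> decide
    · simp only [hh, hm, hr, Bool.false_or, Bool.true_or]
      split_ifs <;> decide
    · simp only [hh, hm, hr, Bool.false_or]
      split_ifs <;> decide

theorem pv_main (l : List String) :
    assess_privacy_level_py l = assess_privacy_level_py_alt l := by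
  show (if l = [] then "low"
        else if l.any (fun t => PySem.Set.contains (PySem.Set.ofList pvHigh) t) then "high"
        else if l.any (fun t => PySem.Set.contains (PySem.Set.ofList pvMed) t) then "medium"
        else "low") =
      (PySem.List.pyGet? pvLabels
        (l.foldl (fun acc t => max acc (PySem.Dict.getD pvRank t 0)) 0)).getD "low"
  rw [pvFold_char]
  by_cases he : l = []
  · subst he; decide
  · rw [if_neg he]
    split_ifs <;> decide

-- ===== VERDICT (by name: the statement is the Claim_ definition above) =====
theorem assess_privacy_level_py_spec : Claim_equal_assess_privacy_level_py := by
  intro l _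
  unfold Spec_assess_privacy_level_py
  exact pv_main l
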